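-- pv_equiv track=rewrite | github.com/stevendimaria/advent-of-code-2025 | day12/day12.py | orientations
-- ===== SOURCE A (Python) =====
-- def normalize(pts):
--     miny = min(y for y, x in pts)
--     minx = min(x for y, x in pts)
--     return {(y - miny, x - minx) for y, x in pts}
--
-- def rotate90(pts):
--     maxy = max(y for y, x in pts)
--     return {(x, maxy - y) for y, x in pts}
--
-- def flip_h(pts):
--     maxx = max(x for y, x in pts)
--     return {(y, maxx - x) for y, x in pts}
--
-- def orientations(pts, allow_flip=True):
--     seen = set()
--     out = []
--     variants = [pts] + ([flip_h(pts)] if allow_flip else [])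
--     for base in variants:
--         cur = base
--         for _ in range(4):
--             cur = normalize(cur)
--             key = tuple(sorted(cur))
--             if key not in seen:
--                 seen.add(key)
--                 out.append(cur)
--             cur = rotate90(cur)
--     return out
-- ===== SOURCE B (Python) =====
-- def orientations(pts, allow_flip=True):
--     # Flat pass over eight closed-form dihedral transforms of the ORIGINAL pts
--     # (A instead chains rotate90/normalize cumulatively).  Same order, same dedup.
--     transforms = [
--         lambda y, x: (y, x),
--         lambda y, x: (x, -y),
--         lambda y, x: (-y, -x),
--         lambda y, x: (-x, y),
--     ]
--     if allow_flip:
--         transforms += [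
--             lambda y, x: (y, -x),
--             lambda y, x: (-x, -y),
--             lambda y, x: (-y, x),
--             lambda y, x: (x, y),
--         ]
--     seen = set()
--     out = []
--     for t in transforms:
--         img = {t(y, x) for y, x in pts}
--         miny = min(y for y, x in img)
--         minx = min(x for y, x in img)
--         cur = {(y - miny, x - minx) for y, x in img}
--         key = tuple(sorted(cur))
--         if key not in seen:
--             seen.add(key)
--             out.append(cur)
--     return out
-- ===== Notes on version B (the rewrite author's own statement) =====
-- stated objective: alternative
-- what changed: Replaces A's cumulative normalize/rotate90/flip chain (state threaded through 4 rotations per variant) with a single flat pass that applies eight closed-form dihedral coordinate transforms directly to the original point list, normalizing each image independently; encounter order and dedup are preserved.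
import Mathlib
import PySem

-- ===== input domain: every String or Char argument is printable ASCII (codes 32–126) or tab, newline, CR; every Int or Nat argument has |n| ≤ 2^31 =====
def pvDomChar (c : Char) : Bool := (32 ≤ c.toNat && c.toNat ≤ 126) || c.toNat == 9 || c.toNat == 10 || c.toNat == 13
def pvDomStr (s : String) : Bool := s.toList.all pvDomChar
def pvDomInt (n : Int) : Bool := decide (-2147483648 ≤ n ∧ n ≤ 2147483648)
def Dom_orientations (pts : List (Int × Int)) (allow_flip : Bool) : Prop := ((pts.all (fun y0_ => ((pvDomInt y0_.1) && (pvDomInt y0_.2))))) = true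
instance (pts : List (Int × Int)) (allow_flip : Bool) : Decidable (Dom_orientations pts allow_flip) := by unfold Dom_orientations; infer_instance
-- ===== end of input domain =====

-- B's change: one flat pass over eight closed-form dihedral transforms of the original
-- points, instead of A's cumulative normalize/rotate90/flip chain; same order and dedup.
-- A raises ValueError (min of an empty sequence) on pts = [], and so does B: Pre_ excludes it.

-- min(...)/max(...) over a generator of Ints; total form used only under Pre_ (nonempty list)
def minVal (l : List Int) : Int := (PySem.List.min? l (fun v => v)).getD 0
def maxVal (l : List Int) : Int := (PySem.List.max? l (fun v => v)).getD 0

-- ===== PORT A =====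
def pyNormalize (s : List (Int × Int)) : List (Int × Int) :=
  let miny := minVal (s.map (fun p => p.1))
  let minx := minVal (s.map (fun p => p.2))
  PySem.Set.ofList (s.map (fun p => (p.1 - miny, p.2 - minx)))

def pyRotate90 (s : List (Int × Int)) : List (Int × Int) :=
  let maxy := maxVal (s.map (fun p => p.1))
  PySem.Set.ofList (s.map (fun p => (p.2, maxy - p.1)))

def pyFlipH (s : List (Int × Int)) : List (Int × Int) :=
  let maxx := maxVal (s.map (fun p => p.2))
  PySem.Set.ofList (s.map (fun p => (p.1, maxx - p.2)))

-- the body of A's inner 'for _ in range(4)' loop, factored out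
def innerA (st2 : (PySem.Set (List (Int × Int)) × List (List (Int × Int))) × List (Int × Int))
    (_ : Int) : (PySem.Set (List (Int × Int)) × List (List (Int × Int))) × List (Int × Int) :=
  let cur := pyNormalize st2.2
  let key := PySem.List.sorted2 cur (fun p => p.1) (fun p => p.2)
  let st3 :=
    if PySem.Set.contains st2.1.1 key then st2.1
    else (PySem.Set.add st2.1.1 key, st2.1.2 ++ [cur])
  (st3, pyRotate90 cur)

def orientations (pts : List (Int × Int)) (allow_flip : Bool) : List (List (Int × Int)) :=
  let variants := [pts] ++ (if allow_flip then [pyFlipH pts] else [])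
  let res := variants.foldl
    (fun (st : PySem.Set (List (Int × Int)) × List (List (Int × Int))) base =>
      ((PySem.List.pyRange 0 4 1).foldl innerA (st, base)).1)
    (PySem.Set.empty, [])
  res.2

-- ===== PORT B =====
def orientations_alt (pts : List (Int × Int)) (allow_flip : Bool) : List (List (Int × Int)) :=
  let transforms : List ((Int × Int) → (Int × Int)) :=
    [fun p => (p.1, p.2), fun p => (p.2, -p.1), fun p => (-p.1, -p.2), fun p => (-p.2, p.1)]
    ++ (if allow_flip then
          [fun p => (p.1, -p.2), fun p => (-p.2, -p.1), fun p => (-p.1, p.2), fun p => (p.2, p.1)]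
        else [])
  let res := transforms.foldl
    (fun (st : PySem.Set (List (Int × Int)) × List (List (Int × Int))) t =>
      let img := PySem.Set.ofList (pts.map t)
      let miny := minVal (img.map (fun p => p.1))
      let minx := minVal (img.map (fun p => p.2))
      let cur := PySem.Set.ofList (img.map (fun p => (p.1 - miny, p.2 - minx)))
      let key := PySem.List.sorted2 cur (fun p => p.1) (fun p => p.2)
      if PySem.Set.contains st.1 key then st
      else (PySem.Set.add st.1 key, st.2 ++ [cur]))
    (PySem.Set.empty, [])
  res.2

-- ===== PRECONDITION & SPEC =====
-- Pre_ excludes only the empty point list, on which A raises ValueError (min() of an empty sequence).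
def Pre_orientations (pts : List (Int × Int)) (allow_flip : Bool) : Prop := pts ≠ []
instance (pts : List (Int × Int)) (allow_flip : Bool) : Decidable (Pre_orientations pts allow_flip) := by
  unfold Pre_orientations; infer_instance

def pvWitness_orientations : (List (Int × Int)) × Bool := ([((0 : Int), (1 : Int)), (1, 1)], true)

def Spec_orientations (pts : List (Int × Int)) (allow_flip : Bool) (out : List (List (Int × Int))) : Prop :=
  out = orientations_alt pts allow_flip
instance (pts : List (Int × Int)) (allow_flip : Bool) (out : List (List (Int × Int))) : Decidable (Spec_orientations pts allow_flip out) := by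
  unfold Spec_orientations; infer_instance

-- ===== CLAIM (what is proved, stated in full; the proofs are below) =====
def Claim_equal_orientations : Prop := ∀ (pts : List (Int × Int)) (allow_flip : Bool), Dom_orientations pts allow_flip → Pre_orientations pts allow_flip → Spec_orientations pts allow_flip (orientations pts allow_flip)

-- ===== LEMMAS AND PROOFS =====

-- the common dedup step: both loops append a candidate set iff its sorted key is unseen
def dstep (st : PySem.Set (List (Int × Int)) × List (List (Int × Int))) (c : List (Int × Int)) :
    PySem.Set (List (Int × Int)) × List (List (Int × Int)) :=
  let key := PySem.List.sorted2 c (fun p => p.1) (fun p => p.2)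
  if PySem.Set.contains st.1 key then st else (PySem.Set.add st.1 key, st.2 ++ [c])

-- A's candidate sets, as produced by its cumulative chain
def chain4 (base : List (Int × Int)) : List (List (Int × Int)) :=
  let c0 := pyNormalize base
  let c1 := pyNormalize (pyRotate90 c0)
  let c2 := pyNormalize (pyRotate90 c1)
  let c3 := pyNormalize (pyRotate90 c2)
  [c0, c1, c2, c3]

def candsA (pts : List (Int × Int)) (allow_flip : Bool) : List (List (Int × Int)) :=
  chain4 pts ++ (if allow_flip then chain4 (pyFlipH pts) else [])

-- B's candidate set for one transform
def bc (pts : List (Int × Int)) (t : (Int × Int) → (Int × Int)) : List (Int × Int) :=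
  pyNormalize (PySem.Set.ofList (pts.map t))

def candsB (pts : List (Int × Int)) (allow_flip : Bool) : List (List (Int × Int)) :=
  [bc pts (fun p => (p.1, p.2)), bc pts (fun p => (p.2, -p.1)),
   bc pts (fun p => (-p.1, -p.2)), bc pts (fun p => (-p.2, p.1))]
  ++ (if allow_flip then
        [bc pts (fun p => (p.1, -p.2)), bc pts (fun p => (-p.2, -p.1)),
         bc pts (fun p => (-p.1, p.2)), bc pts (fun p => (p.2, p.1))]
      else [])

set_option maxHeartbeats 1000000 in
theorem inner_spec (st : PySem.Set (List (Int × Int)) × List (List (Int × Int)))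
    (base : List (Int × Int)) :
    ((PySem.List.pyRange 0 4 1).foldl innerA (st, base)).1 = (chain4 base).foldl dstep st := rfl

theorem A_fold (pts : List (Int × Int)) (fl : Bool) :
    orientations pts fl = ((candsA pts fl).foldl dstep (PySem.Set.empty, [])).2 := by
  cases fl <;>
    simp only [orientations, candsA, Bool.false_eq_true, if_true, if_false, List.append_nil, List.cons_append,
      List.nil_append, List.foldl_cons, List.foldl_nil, List.foldl_append] <;>
    rw [inner_spec] <;> try rw [inner_spec]

set_option maxHeartbeats 2000000 in
theorem B_fold (pts : List (Int × Int)) (fl : Bool) :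
    orientations_alt pts fl = ((candsB pts fl).foldl dstep (PySem.Set.empty, [])).2 := by
  cases fl <;> rfl

-- zeta-expanded equation lemmas for the ports' helpers
theorem pyNormalize_def (s : List (Int × Int)) :
    pyNormalize s = PySem.Set.ofList (s.map (fun p =>
      (p.1 - minVal (s.map (fun p => p.1)), p.2 - minVal (s.map (fun p => p.2))))) := rfl

theorem pyRotate90_def (s : List (Int × Int)) :
    pyRotate90 s = PySem.Set.ofList (s.map (fun p =>
      (p.2, maxVal (s.map (fun p => p.1)) - p.1))) := rfl

theorem pyFlipH_def (s : List (Int × Int)) :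
    pyFlipH s = PySem.Set.ofList (s.map (fun p =>
      (p.1, maxVal (s.map (fun p => p.2)) - p.2))) := rfl

theorem minVal_mem {l : List Int} (h : l ≠ []) : minVal l ∈ l := by
  unfold minVal
  cases hm : PySem.List.min? l (fun v => v) with
  | none => exact absurd ((PySem.List.min?_eq_none_iff l _).mp hm) h
  | some m => simpa using PySem.List.min?_mem hm

theorem minVal_isMin {l : List Int} {y : Int} (hy : y ∈ l) : minVal l ≤ y := by
  unfold minVal
  cases hm : PySem.List.min? l (fun v => v) with
  | none =>
      have : l = [] := (PySem.List.min?_eq_none_iff l _).mp hm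
      rw [this] at hy
      exact absurd hy List.not_mem_nil
  | some m => simpa using PySem.List.min?_isMin hm y hy

theorem minVal_congr {l l' : List Int} (h : l ≠ []) (hmem : ∀ x, x ∈ l ↔ x ∈ l') :
    minVal l = minVal l' := by
  have h' : l' ≠ [] := by
    cases l with
    | nil => exact absurd rfl h
    | cons a t => exact List.ne_nil_of_mem ((hmem a).mp List.mem_cons_self)
  exact le_antisymm (minVal_isMin ((hmem _).mpr (minVal_mem h')))
    (minVal_isMin ((hmem _).mp (minVal_mem h)))

theorem minVal_shift {l : List Int} (h : l ≠ []) (a : Int) :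
    minVal (l.map (fun v => v + a)) = minVal l + a := by
  have h' : l.map (fun v => v + a) ≠ [] := by simpa using h
  rcases List.mem_map.mp (minVal_mem h') with ⟨z, hz, hze⟩
  have h1 : minVal l ≤ z := minVal_isMin hz
  have h2 : minVal (l.map (fun v => v + a)) ≤ minVal l + a :=
    minVal_isMin (List.mem_map.mpr ⟨minVal l, minVal_mem h, rfl⟩)
  omega

theorem ofList_map_inj {α β : Type} [BEq α] [LawfulBEq α] [BEq β] [LawfulBEq β] {f : α → β}
    (hf : Function.Injective f) (l : List α) :
    PySem.Set.ofList (l.map f) = (PySem.Set.ofList l).map f := by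
  induction l using List.reverseRecOn with
  | nil => rfl
  | append_singleton xs x ih =>
    rw [List.map_append, List.map_singleton, PySem.Set.ofList_append_singleton,
        PySem.Set.ofList_append_singleton, ih, PySem.Set.add_eq_ite, PySem.Set.add_eq_ite]
    by_cases hx : x ∈ PySem.Set.ofList xs
    · simp [hx, List.mem_map_of_injective hf]
    · simp [hx, List.mem_map_of_injective hf]

theorem ofList_map_ofList {α β : Type} [BEq α] [LawfulBEq α] [BEq β] [LawfulBEq β] {f : α → β}
    (hf : Function.Injective f) (l : List α) :
    PySem.Set.ofList ((PySem.Set.ofList l).map f) = PySem.Set.ofList (l.map f) := by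
  rw [← ofList_map_inj hf l, PySem.Set.ofList_ofList]

theorem ofList_ne_nil {α : Type} [BEq α] [LawfulBEq α] {l : List α} (h : l ≠ []) :
    PySem.Set.ofList l ≠ [] := by
  cases l with
  | nil => exact absurd rfl h
  | cons a t => exact List.ne_nil_of_mem ((PySem.Set.mem_ofList _ _).mpr List.mem_cons_self)

theorem sub_inj (m1 m2 : Int) :
    Function.Injective (fun p : Int × Int => (p.1 - m1, p.2 - m2)) := by
  intro p q hpq
  simp only [Prod.mk.injEq] at hpq
  exact Prod.ext (by omega) (by omega)

-- normalize ignores a per-point translation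
theorem pyNormalize_translate {x : List (Int × Int)} (h : x ≠ []) (a b : Int) :
    pyNormalize (x.map (fun p => (p.1 + a, p.2 + b))) = pyNormalize x := by
  rw [pyNormalize_def, pyNormalize_def]
  have hf : (x.map (fun p => (p.1 + a, p.2 + b))).map (fun p : Int × Int => p.1)
      = (x.map (fun p : Int × Int => p.1)).map (fun v => v + a) := by
    simp [List.map_map]
  have hs : (x.map (fun p => (p.1 + a, p.2 + b))).map (fun p : Int × Int => p.2)
      = (x.map (fun p : Int × Int => p.2)).map (fun v => v + b) := by
    simp [List.map_map]
  have h1 : x.map (fun p : Int × Int => p.1) ≠ [] := by simpa using h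
  have h2 : x.map (fun p : Int × Int => p.2) ≠ [] := by simpa using h
  rw [hf, hs, minVal_shift h1 a, minVal_shift h2 b]
  congr 1
  rw [List.map_map]
  apply List.map_congr_left
  intro p _
  simp only [Function.comp]
  exact Prod.ext (by omega) (by omega)

-- normalize sees only the member set: dedup before it changes nothing
theorem pyNormalize_ofList (x : List (Int × Int)) :
    pyNormalize (PySem.Set.ofList x) = pyNormalize x := by
  cases hx : x with
  | nil => rfl
  | cons a t =>
    rw [← hx]
    have h : x ≠ [] := by rw [hx]; exact List.cons_ne_nil a t
    have hmem : ∀ (g : Int × Int → Int) (y : Int),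
        y ∈ (PySem.Set.ofList x).map g ↔ y ∈ x.map g := by
      intro g y
      constructor
      · intro hy
        rcases List.mem_map.mp hy with ⟨p, hp, hpe⟩
        exact List.mem_map.mpr ⟨p, (PySem.Set.mem_ofList _ _).mp hp, hpe⟩
      · intro hy
        rcases List.mem_map.mp hy with ⟨p, hp, hpe⟩
        exact List.mem_map.mpr ⟨p, (PySem.Set.mem_ofList _ _).mpr hp, hpe⟩
    rw [pyNormalize_def, pyNormalize_def]
    have e1 : minVal ((PySem.Set.ofList x).map (fun p : Int × Int => p.1))
        = minVal (x.map (fun p : Int × Int => p.1)) :=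
      minVal_congr (by simpa using ofList_ne_nil h) (hmem _)
    have e2 : minVal ((PySem.Set.ofList x).map (fun p : Int × Int => p.2))
        = minVal (x.map (fun p : Int × Int => p.2)) :=
      minVal_congr (by simpa using ofList_ne_nil h) (hmem _)
    rw [e1, e2]
    exact ofList_map_ofList (sub_inj _ _) x

-- the core chain identity: a rotate step after normalization is the closed-form rotation
theorem chain_step {s : List (Int × Int)} (h : s ≠ []) :
    pyNormalize (pyRotate90 (pyNormalize s))
      = pyNormalize (PySem.Set.ofList (s.map (fun p => (p.2, -p.1)))) := by
  set m1 := minVal (s.map (fun p : Int × Int => p.1)) with hm1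
  set m2 := minVal (s.map (fun p : Int × Int => p.2)) with hm2
  rw [pyNormalize_def s]
  set ns := PySem.Set.ofList (s.map (fun p =>
    (p.1 - minVal (s.map (fun p => p.1)), p.2 - minVal (s.map (fun p => p.2))))) with hns
  have hns_ne : ns ≠ [] := ofList_ne_nil (by simpa using h)
  rw [pyRotate90_def ns]
  set M := maxVal (ns.map (fun p : Int × Int => p.1)) with hM
  rw [pyNormalize_ofList]
  have e1 : ns.map (fun p : Int × Int => (p.2, M - p.1))
      = (ns.map (fun p : Int × Int => (p.2, -p.1))).map (fun p => (p.1 + 0, p.2 + M)) := by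
    rw [List.map_map]
    apply List.map_congr_left
    intro p _
    simp only [Function.comp]
    exact Prod.ext (by omega) (by omega)
  rw [e1, pyNormalize_translate (by simpa using hns_ne) 0 M, hns, ← pyNormalize_ofList
      ((PySem.Set.ofList (s.map (fun p => (p.1 - minVal (s.map (fun p => p.1)),
        p.2 - minVal (s.map (fun p => p.2)))))).map (fun p : Int × Int => (p.2, -p.1)))]
  rw [ofList_map_ofList (by
        intro p q hpq
        simp only [Prod.mk.injEq] at hpq
        exact Prod.ext (by omega) (by omega)) _]
  rw [pyNormalize_ofList, List.map_map]
  have e3 : s.map ((fun p : Int × Int => (p.2, -p.1)) ∘ fun p : Int × Int =>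
        (p.1 - minVal (s.map (fun p => p.1)), p.2 - minVal (s.map (fun p => p.2))))
      = (s.map (fun p : Int × Int => (p.2, -p.1))).map (fun p => (p.1 + (-m2), p.2 + m1)) := by
    rw [List.map_map]
    apply List.map_congr_left
    intro p _
    simp only [Function.comp, hm1, hm2]
    exact Prod.ext (by omega) (by omega)
  rw [e3, pyNormalize_translate (by simpa using h) (-m2) m1, ← pyNormalize_ofList
      (s.map (fun p : Int × Int => (p.2, -p.1)))]

-- bc formulation of the chain step
theorem bc_step {pts : List (Int × Int)} (h : pts ≠ []) (t : (Int × Int) → (Int × Int)) :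
    pyNormalize (pyRotate90 (bc pts t)) = bc pts (fun p => ((t p).2, -(t p).1)) := by
  unfold bc
  rw [pyNormalize_ofList, chain_step (by simpa using h)]
  rw [show (pts.map t).map (fun p : Int × Int => (p.2, -p.1))
        = pts.map (fun p => ((t p).2, -(t p).1)) from by rw [List.map_map]; rfl]

theorem bc_congr (pts : List (Int × Int)) {t t' : (Int × Int) → (Int × Int)}
    (h : ∀ p, t p = t' p) : bc pts t = bc pts t' := by
  unfold bc
  rw [List.map_congr_left (fun p _ => h p)]

theorem cands_eq (pts : List (Int × Int)) (fl : Bool) (h : pts ≠ []) :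
    candsA pts fl = candsB pts fl := by
  have hc0 : pyNormalize pts = bc pts (fun p => (p.1, p.2)) := by
    unfold bc
    rw [show pts.map (fun p : Int × Int => (p.1, p.2)) = pts from by simp,
        pyNormalize_ofList]
  have hc1 : pyNormalize (pyRotate90 (bc pts (fun p => (p.1, p.2))))
      = bc pts (fun p => (p.2, -p.1)) := bc_step h _
  have hc2 : pyNormalize (pyRotate90 (bc pts (fun p => (p.2, -p.1))))
      = bc pts (fun p => (-p.1, -p.2)) := bc_step h _
  have hc3 : pyNormalize (pyRotate90 (bc pts (fun p => (-p.1, -p.2))))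
      = bc pts (fun p => (-p.2, p.1)) := by
    rw [bc_step h _]
    exact bc_congr pts (fun p => Prod.ext rfl (by omega))
  have hf0 : pyNormalize (pyFlipH pts) = bc pts (fun p => (p.1, -p.2)) := by
    rw [pyFlipH_def, pyNormalize_ofList]
    rw [show pts.map (fun p : Int × Int => (p.1, maxVal (pts.map (fun p => p.2)) - p.2))
          = (pts.map (fun p : Int × Int => (p.1, -p.2))).map
              (fun p => (p.1 + 0, p.2 + maxVal (pts.map (fun p : Int × Int => p.2)))) from by
      rw [List.map_map]
      apply List.map_congr_left
      intro p _
      simp only [Function.comp]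
      exact Prod.ext (by omega) (by omega)]
    rw [pyNormalize_translate (by simpa using h) 0 _]
    unfold bc
    rw [pyNormalize_ofList]
  have hf1 : pyNormalize (pyRotate90 (bc pts (fun p => (p.1, -p.2))))
      = bc pts (fun p => (-p.2, -p.1)) := bc_step h _
  have hf2 : pyNormalize (pyRotate90 (bc pts (fun p => (-p.2, -p.1))))
      = bc pts (fun p => (-p.1, p.2)) := by
    rw [bc_step h _]
    exact bc_congr pts (fun p => Prod.ext rfl (by omega))
  have hf3 : pyNormalize (pyRotate90 (bc pts (fun p => (-p.1, p.2))))
      = bc pts (fun p => (p.2, p.1)) := by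
    rw [bc_step h _]
    exact bc_congr pts (fun p => Prod.ext rfl (by omega))
  unfold candsA candsB chain4
  cases fl <;> simp only [if_true] <;>
    rw [hc0, hc1, hc2, hc3] <;> try rw [hf0, hf1, hf2, hf3]

-- ===== VERDICT (by name: the statement is the Claim_ definition above) =====
theorem orientations_spec : Claim_equal_orientations := by
  intro pts fl _ hpre
  unfold Spec_orientations
  rw [A_fold, B_fold, cands_eq pts fl hpre]
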